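-- pv_equiv track=rewrite | github.com/sage-bomb/Deployable-Knowledge | embedding_and_storing.py | static_chunking
-- ===== SOURCE A (Python) =====
-- def static_chunking(text, chunk_size, overlap):
--     """Chunks text while tracking line numbers for metadata."""
--     lines = text.splitlines()
--     full_text = "\n".join(lines)
--     chunks, line_info = [], []
--
--     start_char = 0
--     while start_char < len(full_text):
--         end_char = min(start_char + chunk_size, len(full_text))
--         chunk = full_text[start_char:end_char]
--         chunk_start_line = full_text[:start_char].count('\n')
--         chunks.append(chunk)
--         line_info.append(chunk_start_line)
--         start_char += chunk_size - overlap
--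
--     return chunks, line_info
-- ===== SOURCE B (Python) =====
-- def static_chunking(text, chunk_size, overlap):
--     """Chunks text while tracking line numbers for metadata.
--
--     A prefix-sum table of newline counts is built in one pass; each chunk's
--     start line is then a table lookup instead of recounting the whole prefix.
--     """
--     full_text = "\n".join(text.splitlines())
--     n = len(full_text)
--     if n == 0:
--         return [], []
--     prefix = [0]
--     acc = 0
--     for ch in full_text:
--         acc += 1 if ch == '\n' else 0
--         prefix.append(acc)
--     step = chunk_size - overlap
--     chunks = [full_text[s:min(s + chunk_size, n)] for s in range(0, n, step)]
--     line_info = [prefix[s] for s in range(0, n, step)]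
--     return chunks, line_info
-- ===== Notes on version B (the rewrite author's own statement) =====
-- stated objective: alternative
-- what changed: B precomputes a prefix-sum table of newline counts in one pass and reads each chunk's start line from it, replacing A's per-chunk full_text[:start].count('\n') rescans; chunk starts come from a single range(0, n, step).
import Mathlib
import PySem

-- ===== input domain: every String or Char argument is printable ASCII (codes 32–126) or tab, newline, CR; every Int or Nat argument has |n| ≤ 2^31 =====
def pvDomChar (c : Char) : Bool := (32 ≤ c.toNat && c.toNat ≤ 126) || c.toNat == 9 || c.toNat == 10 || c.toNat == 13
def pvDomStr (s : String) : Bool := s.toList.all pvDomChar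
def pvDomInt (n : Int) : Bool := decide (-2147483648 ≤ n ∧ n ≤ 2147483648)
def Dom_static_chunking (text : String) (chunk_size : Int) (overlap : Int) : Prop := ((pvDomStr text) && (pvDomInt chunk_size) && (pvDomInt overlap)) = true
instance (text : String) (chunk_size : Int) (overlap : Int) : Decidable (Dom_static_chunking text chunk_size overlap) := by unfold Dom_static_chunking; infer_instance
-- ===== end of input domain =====

-- B replaces A's per-chunk full-prefix newline recount by a one-pass prefix-sum table of newline counts (objective: alternative).

-- ===== PORT A =====
-- A's while loop; fuel = remaining length bound (the loop advances start by chunk_size - overlap,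
-- ≥ 1 inside Pre_, so |full_text| + 1 steps always suffice there).
def aLoop (ft : List Char) (chunk_size overlap : Int) : Nat → Int → List String → List Int → List String × List Int
  | 0, _, chunks, line_info => (chunks, line_info)
  | fuel + 1, start_char, chunks, line_info =>
    if start_char < (ft.length : Int) then
      let end_char := min (start_char + chunk_size) (ft.length : Int)
      let chunk := String.ofList (PySem.List.slice ft (some start_char) (some end_char))
      let chunk_start_line : Int := PySem.Chars.count (PySem.List.slice ft none (some start_char)) ['\n']
      aLoop ft chunk_size overlap fuel (start_char + (chunk_size - overlap))
        (chunks ++ [chunk]) (line_info ++ [chunk_start_line])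
    else (chunks, line_info)

def static_chunking (text : String) (chunk_size : Int) (overlap : Int) : List String × List Int :=
  let lines := PySem.Chars.splitlines text.toList
  let full_text := PySem.Chars.join ['\n'] lines
  aLoop full_text chunk_size overlap (full_text.length + 1) 0 [] []

-- ===== PORT B =====
-- prefix-sum table of newline counts: prefix = [0]; acc = 0; for ch in full_text: acc += ch=='\n'; prefix.append(acc)
def bPrefix (ft : List Char) : List Int :=
  (ft.foldl (fun (p : List Int × Int) ch =>
      let acc := p.2 + (if ch = '\n' then 1 else 0)
      (p.1 ++ [acc], acc)) ([0], 0)).1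

def static_chunking_alt (text : String) (chunk_size : Int) (overlap : Int) : List String × List Int :=
  let full_text := PySem.Chars.join ['\n'] (PySem.Chars.splitlines text.toList)
  let n : Int := full_text.length
  if n = 0 then ([], []) else
    let pref := bPrefix full_text
    let step := chunk_size - overlap
    let starts := PySem.List.pyRange 0 n step
    (starts.map (fun s => String.ofList (PySem.List.slice full_text (some s) (some (min (s + chunk_size) n)))),
     starts.map (fun s => PySem.List.pyGetD pref s 0))

-- ===== PRECONDITION & SPEC =====
-- Pre_ excludes only the inputs where A never returns: a nonempty normalized text with
-- step chunk_size - overlap ≤ 0 makes A's while loop run forever. The normalized text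
-- "\n".join(text.splitlines()) is empty exactly for "", "\n", "\r", "\r\n".
def Pre_static_chunking (text : String) (chunk_size : Int) (overlap : Int) : Prop :=
  1 ≤ chunk_size - overlap ∨ text = "" ∨ text = "\n" ∨ text = "\r" ∨ text = "\r\n"
instance (text : String) (chunk_size : Int) (overlap : Int) : Decidable (Pre_static_chunking text chunk_size overlap) := by unfold Pre_static_chunking; infer_instance

def pvWitness_static_chunking : String × Int × Int := ("a\nbc\nd", 3, 1)

def Spec_static_chunking (text : String) (chunk_size : Int) (overlap : Int) (out : List String × List Int) : Prop := out = static_chunking_alt text chunk_size overlap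
instance (text : String) (chunk_size : Int) (overlap : Int) (out : List String × List Int) : Decidable (Spec_static_chunking text chunk_size overlap out) := by unfold Spec_static_chunking; infer_instance

-- ===== CLAIM (what is proved, stated in full; the proofs are below) =====
def Claim_equal_static_chunking : Prop := ∀ (text : String) (chunk_size : Int) (overlap : Int), Dom_static_chunking text chunk_size overlap → Pre_static_chunking text chunk_size overlap → Spec_static_chunking text chunk_size overlap (static_chunking text chunk_size overlap)

-- ===== LEMMAS AND PROOFS =====

-- str.count with a single-character needle is List.count
lemma chars_count_go_singleton (c : Char) (cs : List Char) (fuel : Nat) (acc : Nat)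
    (h : cs.length ≤ fuel) :
    PySem.Chars.count.go [c] fuel cs acc = acc + cs.count c := by
  induction cs generalizing fuel acc with
  | nil => cases fuel <;> simp [PySem.Chars.count.go]
  | cons x t ih =>
    cases fuel with
    | zero => simp at h
    | succ f =>
      simp only [PySem.Chars.count.go, List.isPrefixOf, Bool.and_true]
      by_cases hx : c = x
      · subst hx
        simp only [beq_self_eq_true, if_true, List.length_singleton, List.drop_one, List.tail_cons]
        rw [ih f (acc + 1) (by simpa using h)]
        simp
        omega
      · have : (c == x) = false := by simp [hx]
        simp only [this]
        rw [ih f acc (by simpa using h)]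
        simp [List.count_cons]
        intro hh; exact absurd hh.symm hx

lemma chars_count_singleton (c : Char) (cs : List Char) :
    PySem.Chars.count cs [c] = cs.count c := by
  simp only [PySem.Chars.count, List.isEmpty_cons, if_false, Bool.false_eq_true]
  simpa using chars_count_go_singleton c cs cs.length 0 le_rfl

-- the prefix-sum fold computes newline counts of all prefixes
lemma bPrefix_aux (ft : List Char) :
    ft.foldl (fun (p : List Int × Int) ch =>
        let acc := p.2 + (if ch = '\n' then 1 else 0)
        (p.1 ++ [acc], acc)) ([0], 0)
      = ((List.range (ft.length + 1)).map (fun i => ((ft.take i).count '\n' : Int)),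
         (ft.count '\n' : Int)) := by
  induction ft using List.reverseRecOn with
  | nil => simp
  | append_singleton xs c ih =>
    rw [List.foldl_append, ih]
    simp only [List.foldl_cons, List.foldl_nil, List.length_append, List.length_singleton,
      Prod.mk.injEq]
    have hcount : (xs ++ [c]).count '\n' = xs.count '\n' + (if c = '\n' then 1 else 0) := by
      by_cases hc : c = '\n'
      · simp [hc, List.count_append]
      · simp [List.count_append, hc]
    constructor
    · rw [List.range_succ (n := xs.length + 1), List.map_append]
      congr 1
      · apply List.map_congr_left
        intro i hi
        rw [List.mem_range] at hi
        rw [List.take_append_of_le_length (by omega)]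
      · simp only [List.map_cons, List.map_nil]
        rw [List.take_of_length_le (by simp), hcount]
        push_cast
        ring_nf
    · rw [hcount]; push_cast; ring

lemma bPrefix_eq (ft : List Char) :
    bPrefix ft = (List.range (ft.length + 1)).map (fun i => ((ft.take i).count '\n' : Int)) := by
  unfold bPrefix; rw [bPrefix_aux]

-- A's recount of the prefix equals B's table lookup
lemma line_eq (ft : List Char) (s : Int) (h0 : 0 ≤ s) (hn : s < (ft.length : Int)) :
    (PySem.Chars.count (PySem.List.slice ft none (some s)) ['\n'] : Int)
      = PySem.List.pyGetD (bPrefix ft) s 0 := by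
  rw [PySem.List.slice_to ft h0, chars_count_singleton,
      PySem.List.pyGetD_of_nonneg _ _ h0, bPrefix_eq]
  rw [List.getD_eq_getElem?_getD, List.getElem?_map, List.getElem?_range (by omega)]
  rfl

-- positive-step range unfolds one element at a time
lemma pyRange_pos_cons (a b s : Int) (hs : 0 < s) (hab : a < b) :
    PySem.List.pyRange a b s = a :: PySem.List.pyRange (a + s) b s := by
  rw [PySem.List.pyRange_of_pos a b hs, PySem.List.pyRange_of_pos (a + s) b hs]
  have hcount : ((b - a + s - 1) / s).toNat
      = (if a + s < b then ((b - (a + s) + s - 1) / s).toNat else 0) + 1 := by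
    by_cases h2 : a + s < b
    · simp only [h2, if_true]
      have : b - a + s - 1 = (b - (a + s) + s - 1) + 1 * s := by ring
      rw [this, Int.add_mul_ediv_right _ _ (by omega)]
      have hge : 0 ≤ (b - (a + s) + s - 1) / s := Int.ediv_nonneg (by omega) (by omega)
      omega
    · simp only [h2, if_false]
      have h1 : s ≤ b - a + s - 1 := by omega
      have h2' : b - a + s - 1 < 2 * s := by omega
      have := Int.ediv_le_ediv (by omega : (0:Int) < s) h1
      have h3 : (b - a + s - 1) / s < 2 := by
        apply Int.ediv_lt_of_lt_mul (by omega); omega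
      have h4 : 1 ≤ (b - a + s - 1) / s := by
        calc (1:Int) = s / s := by rw [Int.ediv_self (by omega)]
        _ ≤ _ := this
      omega
  rw [if_pos hab, hcount, List.range_succ_eq_map]
  simp only [List.map_cons, List.map_map, List.cons.injEq]
  constructor
  · ring_nf
  · apply List.map_congr_left; intro k _; simp [Function.comp]; ring

lemma pyRange_pos_nil (a b s : Int) (hs : 0 < s) (hab : b ≤ a) :
    PySem.List.pyRange a b s = [] := by
  rw [PySem.List.pyRange_of_pos a b hs, if_neg (by omega)]
  simp

-- the loop invariant: from any start, A appends exactly the chunks/lines B maps over the range of starts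
lemma aLoop_eq (ft : List Char) (cs ov : Int) (hstep : 1 ≤ cs - ov) :
    ∀ (fuel : Nat) (start : Int), 0 ≤ start → (ft.length : Int) ≤ start + fuel →
    ∀ (chunks : List String) (line_info : List Int),
    aLoop ft cs ov fuel start chunks line_info =
      (chunks ++ (PySem.List.pyRange start ft.length (cs - ov)).map
          (fun s => String.ofList (PySem.List.slice ft (some s) (some (min (s + cs) (ft.length : Int))))),
       line_info ++ (PySem.List.pyRange start ft.length (cs - ov)).map
          (fun s => PySem.List.pyGetD (bPrefix ft) s 0)) := by
  intro fuel
  induction fuel with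
  | zero =>
    intro start h0 hf chunks line_info
    rw [aLoop, pyRange_pos_nil _ _ _ (by omega) (by simpa using hf)]
    simp
  | succ f ih =>
    intro start h0 hf chunks line_info
    rw [aLoop]
    by_cases hlt : start < (ft.length : Int)
    · rw [if_pos hlt, ih (start + (cs - ov)) (by omega) (by push_cast at hf ⊢; omega)]
      rw [pyRange_pos_cons start _ _ (by omega) hlt]
      simp only [List.map_cons, List.append_assoc, List.singleton_append]
      rw [line_eq ft start h0 hlt]
    · rw [if_neg hlt, pyRange_pos_nil _ _ _ (by omega) (by omega)]
      simp

-- ===== VERDICT (by name: the statement is the Claim_ definition above) =====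
theorem static_chunking_spec : Claim_equal_static_chunking := by
  intro text cs ov _ hpre
  unfold Spec_static_chunking
  rcases hpre with hstep | h | h | h | h
  · show static_chunking text cs ov = static_chunking_alt text cs ov
    simp only [static_chunking, static_chunking_alt]
    generalize PySem.Chars.join ['\n'] (PySem.Chars.splitlines text.toList) = ft
    rcases eq_or_ne ft [] with hn | hn
    · subst hn; simp [aLoop]
    · have h1 : 0 < ft.length := List.length_pos_iff.mpr hn
      rw [if_neg (by omega)]
      rw [aLoop_eq ft cs ov hstep (ft.length + 1) 0 le_rfl (by push_cast; omega) [] []]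
      simp
  all_goals (subst h; rfl)
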